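-- pv_equiv track=rewrite | github.com/sairenchristianbuerano/airflow | component-generator/generated_operators/s3_key_sensor/s3_key_sensor.py | _get_prefix_from_wildcard
-- ===== SOURCE A (Python) =====
-- def _get_prefix_from_wildcard(wildcard_key: str) -> str:
--     """Extract prefix from wildcard pattern for efficient S3 listing"""
--     # Find the first wildcard character
--     wildcard_chars = ['*', '?', '[']
--     first_wildcard_pos = len(wildcard_key)
--
--     for char in wildcard_chars:
--         pos = wildcard_key.find(char)
--         if pos != -1 and pos < first_wildcard_pos:
--             first_wildcard_pos = pos
--
--     # Return prefix up to the first wildcard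
--     prefix = wildcard_key[:first_wildcard_pos]
--
--     # Remove trailing partial directory name if wildcard is in filename
--     if '/' in prefix:
--         prefix = '/'.join(prefix.split('/')[:-1])
--         if prefix and not prefix.endswith('/'):
--             prefix += '/'
--
--     return prefix
-- ===== SOURCE B (Python) =====
-- def _get_prefix_from_wildcard(wildcard_key: str) -> str:
--     """Extract prefix from wildcard pattern for efficient S3 listing"""
--     # Single early-stopping pass: collect chars until the first wildcard char.
--     prefix_chars = []
--     for c in wildcard_key:
--         if c in '*?[':
--             break
--         prefix_chars.append(c)
--     prefix = ''.join(prefix_chars)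
--
--     # Cut back to the last '/' (rfind) instead of split/join.
--     slash = prefix.rfind('/')
--     if slash == -1:
--         return prefix
--     head = prefix[:slash]
--     if head and not head.endswith('/'):
--         head += '/'
--     return head
-- ===== Notes on version B (the rewrite author's own statement) =====
-- stated objective: simpler
-- what changed: Three full .find scans plus a min-fold are replaced by one early-stopping left-to-right pass, and the split('/')/join-and-repatch directory trim is replaced by a single rfind('/') and slice.
import Mathlib
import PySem

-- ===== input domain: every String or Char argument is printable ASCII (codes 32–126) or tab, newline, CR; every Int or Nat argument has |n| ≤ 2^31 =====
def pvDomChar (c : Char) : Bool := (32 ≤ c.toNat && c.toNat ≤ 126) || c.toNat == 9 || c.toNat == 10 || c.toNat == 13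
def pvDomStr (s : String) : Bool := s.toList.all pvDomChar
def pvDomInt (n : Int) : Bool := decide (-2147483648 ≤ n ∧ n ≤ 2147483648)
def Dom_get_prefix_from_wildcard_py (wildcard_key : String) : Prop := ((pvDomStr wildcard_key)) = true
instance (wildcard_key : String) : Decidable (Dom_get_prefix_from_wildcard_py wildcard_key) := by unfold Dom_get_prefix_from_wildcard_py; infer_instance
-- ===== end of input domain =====

-- B replaces A's three full `.find` scans + min-fold and its split('/')/join directory trim
-- by one early-stopping pass and a single rfind('/') slice; objective: simpler.

-- ===== PORT A =====
def get_prefix_from_wildcard_py (wildcard_key : String) : String :=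
  -- first_wildcard_pos = len(wildcard_key); for char in ['*','?','[']: pos = wildcard_key.find(char); if pos != -1 and pos < first_wildcard_pos: first_wildcard_pos = pos
  let first_wildcard_pos : Int :=
    (["*", "?", "["] : List String).foldl
      (fun fwp ch =>
        let pos := PySem.Str.find wildcard_key ch
        if pos ≠ -1 ∧ pos < fwp then pos else fwp)
      (PySem.Str.len wildcard_key)
  -- prefix = wildcard_key[:first_wildcard_pos]
  let pfx := PySem.Str.slice wildcard_key none (some first_wildcard_pos)
  -- if '/' in prefix:
  if PySem.Str.isIn "/" pfx = true then
    -- prefix = '/'.join(prefix.split('/')[:-1])   (split('/') cannot raise: the separator is nonempty, so getD never fires)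
    let pfx2 := PySem.Str.join "/" (PySem.List.slice ((PySem.Str.split? pfx "/").getD []) none (some (-1)))
    -- if prefix and not prefix.endswith('/'): prefix += '/'
    if pfx2 ≠ "" ∧ ¬ PySem.Str.endswith pfx2 "/" = true then pfx2 ++ "/" else pfx2
  else pfx

-- ===== PORT B =====
def get_prefix_from_wildcard_py_alt (wildcard_key : String) : String :=
  -- for c in wildcard_key: if c in '*?[': break; prefix_chars.append(c)  — an early-stopping takeWhile
  let pfx := String.ofList (wildcard_key.toList.takeWhile (fun c => !(c == '*' || c == '?' || c == '[')))
  -- slash = prefix.rfind('/')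
  let slash := PySem.Str.rfind pfx "/"
  if slash = -1 then pfx
  else
    -- head = prefix[:slash]
    let head := PySem.Str.slice pfx none (some slash)
    if head ≠ "" ∧ ¬ PySem.Str.endswith head "/" = true then head ++ "/" else head

-- ===== PRECONDITION & SPEC =====
def Spec_get_prefix_from_wildcard_py (wildcard_key : String) (out : String) : Prop := out = get_prefix_from_wildcard_py_alt wildcard_key
instance (wildcard_key : String) (out : String) : Decidable (Spec_get_prefix_from_wildcard_py wildcard_key out) := by unfold Spec_get_prefix_from_wildcard_py; infer_instance

-- ===== CLAIM (what is proved, stated in full; the proofs are below) =====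
def Claim_equal_get_prefix_from_wildcard_py : Prop := ∀ (wildcard_key : String), Dom_get_prefix_from_wildcard_py wildcard_key → Spec_get_prefix_from_wildcard_py wildcard_key (get_prefix_from_wildcard_py wildcard_key)

-- ===== LEMMAS AND PROOFS =====

theorem pv_str_ext {s t : String} (h : s.toList = t.toList) : s = t := by
  have := congrArg String.ofList h
  simpa [String.ofList_toList] using this

theorem pv_single_prefix_iff (c : Char) (l : List Char) : [c] <+: l ↔ l.head? = some c := by
  cases l with
  | nil => simp
  | cons a t => simp [List.cons_prefix_cons, eq_comm]

theorem pv_single_infix_iff_mem (c : Char) (l : List Char) : [c] <:+: l ↔ c ∈ l := by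
  constructor
  · intro h; exact h.subset (List.mem_singleton_self c)
  · intro h
    obtain ⟨s, t, rfl⟩ := List.append_of_mem h
    exact ⟨s, t, by simp⟩

theorem pv_boundary (p : Char → Bool) (cs : List Char) :
    (∀ i < (cs.takeWhile p).length, ∃ x, cs[i]? = some x ∧ p x = true) ∧
    (∀ x, cs[(cs.takeWhile p).length]? = some x → p x = false) := by
  induction cs with
  | nil => simp
  | cons a t ih =>
    cases hpa : p a
    · simp only [List.takeWhile_cons, hpa, Bool.false_eq_true, if_false, List.length_nil]
      constructor
      · intro i hi; omega
      · intro x hx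
        simp only [List.getElem?_cons_zero, Option.some_inj] at hx
        cases hx; exact hpa
    · simp only [List.takeWhile_cons, hpa, if_true, List.length_cons]
      constructor
      · intro i hi
        cases i with
        | zero => exact ⟨a, by simp, hpa⟩
        | succ j =>
          obtain ⟨x, hx, hpx⟩ := ih.1 j (by omega)
          exact ⟨x, by simpa using hx, hpx⟩
      · intro x hx
        exact ih.2 x (by simpa using hx)

theorem pv_find_single_eq {cs : List Char} {c : Char} {k : ℕ}
    (h : cs[k]? = some c) (hmin : ∀ i < k, cs[i]? ≠ some c) :
    PySem.Chars.find cs [c] = (k : ℤ) := by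
  have hmem : c ∈ cs := List.mem_of_getElem? h
  have hne : PySem.Chars.find cs [c] ≠ -1 := by
    rw [ne_eq, PySem.Chars.find_eq_neg_one_iff, not_not, pv_single_infix_iff_mem]
    exact hmem
  have h0 : 0 ≤ PySem.Chars.find cs [c] := by
    have := PySem.Chars.neg_one_le_find cs [c]; omega
  obtain ⟨hocc, hlt⟩ := PySem.Chars.find_spec h0
  rw [pv_single_prefix_iff, List.head?_drop] at hocc
  have hk1 : ¬ k < (PySem.Chars.find cs [c]).toNat := fun hk => (by
    have := hlt k hk
    rw [pv_single_prefix_iff, List.head?_drop] at this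
    exact this h)
  have hk2 : ¬ (PySem.Chars.find cs [c]).toNat < k := fun hk => hmin _ hk hocc
  omega

theorem pv_find_single_ge {cs : List Char} {p : Char → Bool} {c : Char}
    (hc : p c = false) (hne : PySem.Chars.find cs [c] ≠ -1) :
    ((cs.takeWhile p).length : ℤ) ≤ PySem.Chars.find cs [c] := by
  have h0 : 0 ≤ PySem.Chars.find cs [c] := by
    have := PySem.Chars.neg_one_le_find cs [c]; omega
  obtain ⟨hocc, -⟩ := PySem.Chars.find_spec h0
  rw [pv_single_prefix_iff, List.head?_drop] at hocc
  by_contra hlt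
  rw [not_le] at hlt
  have hn : (PySem.Chars.find cs [c]).toNat < (cs.takeWhile p).length := by omega
  obtain ⟨x, hx, hpx⟩ := (pv_boundary p cs).1 _ hn
  rw [hocc] at hx
  cases hx
  rw [hpx] at hc
  exact Bool.true_eq_false.mp hc

-- ---- splitOn on a single-char separator ----

def pvSplit (c : Char) : List Char → List (List Char)
  | [] => [[]]
  | a :: t => if a = c then [] :: pvSplit c t else (pvSplit c t).modifyHead (a :: ·)

theorem pvSplit_cons (c : Char) (l : List Char) : ∃ h tt, pvSplit c l = h :: tt := by
  induction l with
  | nil => exact ⟨[], [], rfl⟩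
  | cons a t ih =>
    obtain ⟨h, tt, ht⟩ := ih
    simp only [pvSplit]
    split
    · exact ⟨[], pvSplit c t, rfl⟩
    · exact ⟨a :: h, tt, by rw [ht]; rfl⟩

theorem pv_go_eq (c : Char) : ∀ (fuel : ℕ) (l cur : List Char) (acc : List (List Char)),
    l.length ≤ fuel →
    PySem.Chars.splitOn.go [c] fuel l cur acc =
      acc.reverse ++ (pvSplit c l).modifyHead (cur.reverse ++ ·) := by
  intro fuel
  induction fuel with
  | zero =>
    intro l cur acc hl
    have : l = [] := by cases l <;> simp_all
    subst this
    simp [PySem.Chars.splitOn.go, pvSplit]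
  | succ n ih =>
    intro l cur acc hl
    cases l with
    | nil => simp [PySem.Chars.splitOn.go, pvSplit]
    | cons a rest =>
      obtain ⟨h, tt, ht⟩ := pvSplit_cons c rest
      have hlen : rest.length ≤ n := by simp at hl; omega
      simp only [PySem.Chars.splitOn.go]
      by_cases hac : a = c
      · subst hac
        rw [if_pos (by simp [List.isPrefixOf])]
        have hd : (a :: rest).drop [a].length = rest := by simp
        rw [hd, ih rest [] (cur.reverse :: acc) hlen]
        rw [ht]
        simp [pvSplit, List.modifyHead, ht]
      · have hpre : [c].isPrefixOf (a :: rest) = false := by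
          simp only [List.isPrefixOf, Bool.and_true, beq_eq_false_iff_ne, ne_eq]
          exact fun he => hac he.symm
        rw [if_neg (by simp [hpre])]
        rw [ih rest (a :: cur) acc hlen]
        simp only [pvSplit, if_neg hac, ht]
        simp [List.modifyHead]

theorem pv_splitOn_eq (c : Char) (l : List Char) :
    PySem.Chars.splitOn l [c] = pvSplit c l := by
  unfold PySem.Chars.splitOn
  rw [pv_go_eq c (l.length + 1) l [] [] (by omega)]
  obtain ⟨h, tt, ht⟩ := pvSplit_cons c l
  rw [ht]
  simp [List.modifyHead]

theorem pv_join_cons (c a : Char) (h : List Char) (tt : List (List Char)) :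
    PySem.Chars.join [c] ((a :: h) :: tt) = a :: PySem.Chars.join [c] (h :: tt) := by
  cases tt with
  | nil => simp [PySem.Chars.join_singleton]
  | cons q r => simp [PySem.Chars.join_cons_cons]

theorem pv_join_pvSplit (c : Char) (l : List Char) :
    PySem.Chars.join [c] (pvSplit c l) = l := by
  induction l with
  | nil => simp [pvSplit, PySem.Chars.join_singleton]
  | cons a t ih =>
    obtain ⟨h, tt, ht⟩ := pvSplit_cons c t
    simp only [pvSplit]
    by_cases hac : a = c
    · subst hac
      rw [if_pos rfl, ht, PySem.Chars.join_cons_cons]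
      rw [ht] at ih
      simp [ih]
    · rw [if_neg hac, ht]
      simp only [List.modifyHead]
      rw [pv_join_cons, ← ht, ih]

theorem pv_pvSplit_no {c : Char} {l : List Char} (h : c ∉ l) : pvSplit c l = [l] := by
  induction l with
  | nil => simp [pvSplit]
  | cons a t ih =>
    simp only [pvSplit]
    rw [if_neg (by intro he; exact h (he ▸ List.mem_cons_self))]
    rw [ih (fun hm => h (List.mem_cons_of_mem a hm))]
    simp [List.modifyHead]

theorem pv_pvSplit_last {c : Char} {L : List Char} (hL : c ∉ L) :
    ∀ Q : List Char, pvSplit c (Q ++ c :: L) = pvSplit c Q ++ [L] := by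
  intro Q
  induction Q with
  | nil => simp [pvSplit, pv_pvSplit_no hL]
  | cons a t ih =>
    simp only [List.cons_append, pvSplit]
    by_cases hac : a = c
    · rw [if_pos hac, if_pos hac, ih]; simp
    · rw [if_neg hac, if_neg hac, ih]
      obtain ⟨h, tt, ht⟩ := pvSplit_cons c t
      rw [ht]
      simp [List.modifyHead]

-- ---- rfind on a single-char needle ----

theorem pv_rfind_go_none {c : Char} {s : List Char} (h : c ∉ s) :
    ∀ k : ℕ, PySem.Chars.rfind.go s [c] k = -1 := by
  intro k
  induction k with
  | zero =>
    simp only [PySem.Chars.rfind.go]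
    rw [if_neg]
    intro hp
    exact h ((List.isPrefixOf_iff_prefix.mp hp).subset (List.mem_singleton_self c))
  | succ j ih =>
    simp only [PySem.Chars.rfind.go]
    rw [if_neg, ih]
    intro hp
    exact h (List.drop_subset _ _ ((List.isPrefixOf_iff_prefix.mp hp).subset (List.mem_singleton_self c)))

theorem pv_rfind_none {c : Char} {s : List Char} (h : c ∉ s) :
    PySem.Chars.rfind s [c] = -1 := by
  unfold PySem.Chars.rfind
  exact pv_rfind_go_none h _

theorem pv_no_c_after {c : Char} {Q L : List Char} (hL : c ∉ L) {k : ℕ} (hk : Q.length < k) :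
    ¬ [c].isPrefixOf ((Q ++ c :: L).drop k) = true := by
  intro hp
  have hmem : c ∈ (Q ++ c :: L).drop k :=
    (List.isPrefixOf_iff_prefix.mp hp).subset (List.mem_singleton_self c)
  obtain ⟨i, hi⟩ := List.getElem?_of_mem hmem
  rw [List.getElem?_drop] at hi
  rw [List.getElem?_append_right (by omega : Q.length ≤ k + i)] at hi
  have : k + i - Q.length = (k + i - Q.length - 1) + 1 := by omega
  rw [this, List.getElem?_cons_succ] at hi
  exact hL (List.mem_of_getElem? hi)

theorem pv_rfind_go_last {c : Char} {Q L : List Char} (hL : c ∉ L) :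
    ∀ k : ℕ, Q.length ≤ k → PySem.Chars.rfind.go (Q ++ c :: L) [c] k = (Q.length : ℤ) := by
  intro k
  induction k with
  | zero =>
    intro hq
    have hQ : Q = [] := List.length_eq_zero_iff.mp (by omega)
    subst hQ
    simp only [PySem.Chars.rfind.go, List.nil_append]
    rw [if_pos (by simp [List.isPrefixOf])]
    simp
  | succ j ih =>
    intro hq
    rcases Nat.eq_or_lt_of_le hq with heq | hlt
    · simp only [PySem.Chars.rfind.go]
      have hdrop : (Q ++ c :: L).drop (j + 1) = c :: L := by
        rw [← heq]; exact List.drop_left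
      rw [hdrop, if_pos (by simp [List.isPrefixOf])]
      omega
    · simp only [PySem.Chars.rfind.go]
      rw [if_neg (pv_no_c_after hL (by omega)), ih (by omega)]

theorem pv_rfind_last {c : Char} {Q L : List Char} (hL : c ∉ L) :
    PySem.Chars.rfind (Q ++ c :: L) [c] = (Q.length : ℤ) := by
  unfold PySem.Chars.rfind
  exact pv_rfind_go_last hL _ (by simp)

-- ---- splitting off the last occurrence ----

theorem pv_last_slash {c : Char} {P : List Char} (h : c ∈ P) :
    ∃ Q L, P = Q ++ c :: L ∧ c ∉ L := by
  induction P with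
  | nil => cases h
  | cons a t ih =>
    by_cases hm : c ∈ t
    · obtain ⟨Q, L, rfl, hL⟩ := ih hm
      exact ⟨a :: Q, L, rfl, hL⟩
    · have : a = c := by
        rcases List.mem_cons.mp h with h1 | h2
        · exact h1.symm
        · exact absurd h2 hm
      exact ⟨[], t, by simp [this], hm⟩

-- ---- phase 1: the fold over the three wildcard characters ----

theorem pv_fold_eq (wildcard_key : String) :
    (["*", "?", "["] : List String).foldl
      (fun fwp ch =>
        if PySem.Str.find wildcard_key ch ≠ -1 ∧ PySem.Str.find wildcard_key ch < fwp
        then PySem.Str.find wildcard_key ch else fwp)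
      (PySem.Str.len wildcard_key)
    = ((wildcard_key.toList.takeWhile (fun c => !(c == '*' || c == '?' || c == '['))).length : ℤ) := by
  set cs := wildcard_key.toList with hcs
  set p : Char → Bool := fun c => !(c == '*' || c == '?' || c == '[') with hp
  set m : ℕ := (cs.takeWhile p).length with hm
  have hlen : PySem.Str.len wildcard_key = (cs.length : ℤ) := by
    rw [PySem.Str.len_eq]
  have hmlen : m ≤ cs.length := by
    rw [hm]; exact (List.takeWhile_prefix p).length_le
  have hfind : ∀ c : Char, PySem.Str.find wildcard_key (String.ofList [c]) = PySem.Chars.find cs [c] := by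
    intro c
    rw [PySem.Str.find_eq, String.toList_ofList]
  have hge : ∀ c : Char, p c = false → PySem.Chars.find cs [c] ≠ -1 → (m : ℤ) ≤ PySem.Chars.find cs [c] :=
    fun c hc hne => pv_find_single_ge hc hne
  have hlb : ∀ c : Char, -1 ≤ PySem.Chars.find cs [c] := fun c => PySem.Chars.neg_one_le_find cs [c]
  have hex : (m : ℤ) = cs.length ∨
      PySem.Chars.find cs ['*'] = m ∨ PySem.Chars.find cs ['?'] = m ∨ PySem.Chars.find cs ['['] = m := by
    rcases Nat.lt_or_ge m cs.length with hlt | hge2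
    · right
      obtain ⟨c₀, hc₀⟩ : ∃ c₀, cs[m]? = some c₀ := ⟨cs[m]'hlt, List.getElem?_eq_getElem hlt⟩
      have hpc₀ : p c₀ = false := (pv_boundary p cs).2 c₀ hc₀
      have hmin : ∀ i < m, cs[i]? ≠ some c₀ := by
        intro i hi he
        obtain ⟨x, hx, hpx⟩ := (pv_boundary p cs).1 i hi
        rw [hx] at he
        cases he
        rw [hpx] at hpc₀
        exact Bool.true_eq_false.mp hpc₀
      have heq := pv_find_single_eq hc₀ hmin
      have hw : c₀ = '*' ∨ c₀ = '?' ∨ c₀ = '[' := by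
        rw [hp] at hpc₀
        simp only [Bool.not_eq_false'] at hpc₀
        rcases Bool.or_eq_true_iff.mp hpc₀ with h1 | h2
        · rcases Bool.or_eq_true_iff.mp h1 with ha | hb
          · exact Or.inl (by simpa using ha)
          · exact Or.inr (Or.inl (by simpa using hb))
        · exact Or.inr (Or.inr (by simpa using h2))
      rcases hw with rfl | rfl | rfl
      · exact Or.inl heq
      · exact Or.inr (Or.inl heq)
      · exact Or.inr (Or.inr heq)
    · left; omega
  have hstar : ("*" : String) = String.ofList ['*'] := rfl
  have hq : ("?" : String) = String.ofList ['?'] := rfl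
  have hbr : ("[" : String) = String.ofList ['['] := rfl
  simp only [List.foldl, hstar, hq, hbr, hfind, hlen]
  have h1 := hlb '*'
  have h2 := hlb '?'
  have h3 := hlb '['
  have g1 : PySem.Chars.find cs ['*'] ≠ -1 → (m:ℤ) ≤ PySem.Chars.find cs ['*'] := hge '*' (by rw [hp]; simp)
  have g2 : PySem.Chars.find cs ['?'] ≠ -1 → (m:ℤ) ≤ PySem.Chars.find cs ['?'] := hge '?' (by rw [hp]; simp)
  have g3 : PySem.Chars.find cs ['['] ≠ -1 → (m:ℤ) ≤ PySem.Chars.find cs ['['] := hge '[' (by rw [hp]; simp)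
  split_ifs <;> omega

-- ===== VERDICT (by name: the statement is the Claim_ definition above) =====
theorem get_prefix_from_wildcard_py_spec : Claim_equal_get_prefix_from_wildcard_py := by
  intro wildcard_key _
  unfold Spec_get_prefix_from_wildcard_py
  have hslash : ("/" : String).toList = ['/'] := rfl
  simp only [get_prefix_from_wildcard_py, get_prefix_from_wildcard_py_alt]
  rw [pv_fold_eq]
  set P : List Char := wildcard_key.toList.takeWhile (fun c => !(c == '*' || c == '?' || c == '[')) with hPdef
  set pfxA := PySem.Str.slice wildcard_key none (some ((P.length : ℤ))) with hA
  set pfxB := String.ofList P with hB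
  have hAP : pfxA.toList = P := by
    rw [hA, PySem.Str.toList_slice, PySem.Chars.slice_eq_listSlice, PySem.List.slice_to_natCast]
    exact (List.prefix_iff_eq_take.mp (List.takeWhile_prefix _)).symm
  have hBP : pfxB.toList = P := by rw [hB, String.toList_ofList]
  have hAB : pfxB = pfxA := pv_str_ext (hBP.trans hAP.symm)
  rw [hAB]
  by_cases hm : '/' ∈ P
  · obtain ⟨Q, L, hPQ, hL⟩ := pv_last_slash hm
    have hIsIn : PySem.Str.isIn "/" pfxA = true := by
      rw [PySem.Str.isIn_iff_infix, hslash, hAP]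
      exact (pv_single_infix_iff_mem _ _).mpr hm
    have hrf : PySem.Str.rfind pfxA "/" = (Q.length : ℤ) := by
      rw [PySem.Str.rfind_eq, hAP, hslash, hPQ]
      exact pv_rfind_last hL
    have hsplit : (PySem.Str.split? pfxA "/").getD [] = (pvSplit '/' P).map String.ofList := by
      simp only [PySem.Str.split?, PySem.Chars.split?, hslash, hAP]
      simp [pv_splitOn_eq]
    have hdrop : PySem.List.slice ((pvSplit '/' P).map String.ofList) none (some (-1))
        = (pvSplit '/' Q).map String.ofList := by
      rw [PySem.List.slice_to_neg_one, hPQ, pv_pvSplit_last hL, List.map_append]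
      simp
    have hjoin : (PySem.Str.join "/" ((pvSplit '/' Q).map String.ofList)).toList = Q := by
      rw [PySem.Str.toList_join, hslash, List.map_map]
      have : (String.toList ∘ String.ofList) = id := by
        funext x; simp [String.toList_ofList]
      rw [this, List.map_id]
      exact pv_join_pvSplit '/' Q
    have hheadT : (PySem.Str.slice pfxA none (some ((Q.length : ℤ)))).toList = Q := by
      rw [PySem.Str.toList_slice, PySem.Chars.slice_eq_listSlice, PySem.List.slice_to_natCast, hAP, hPQ]
      exact (List.prefix_iff_eq_take.mp ⟨'/' :: L, rfl⟩).symm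
    have hph : PySem.Str.join "/" ((pvSplit '/' Q).map String.ofList)
        = PySem.Str.slice pfxA none (some ((Q.length : ℤ))) :=
      pv_str_ext (hjoin.trans hheadT.symm)
    rw [hIsIn, hrf, hsplit, hdrop, hph]
    rw [if_pos rfl, if_neg (by omega : ¬ ((Q.length : ℤ) = -1))]
  · have hIsIn : PySem.Str.isIn "/" pfxA = false := by
      rw [Bool.eq_false_iff, ne_eq, PySem.Str.isIn_iff_infix, hslash, hAP]
      intro h
      exact hm ((pv_single_infix_iff_mem _ _).mp h)
    have hrf : PySem.Str.rfind pfxA "/" = -1 := by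
      rw [PySem.Str.rfind_eq, hAP, hslash]
      exact pv_rfind_none hm
    rw [hIsIn, hrf]
    simp
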